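-- pv_equiv track=rewrite | github.com/ayoubzulfiqar/Leeteration | PatientsWithaCondition/patients_with_a_condition.py | findPatientsWithDiabetes
-- ===== SOURCE A (Python) =====
-- def findPatientsWithDiabetes(patients: list[dict]) -> list[dict]:
--     result = []
--     for patient in patients:
--         conditions_str = patient["conditions"]
--
--         # Split the conditions string into individual codes.
--         # filter(None, ...) removes any empty strings that might result from multiple spaces
--         # or an empty conditions string.
--         codes = list(filter(None, conditions_str.split(' ')))
--
--         found_diabetes = False
--         for code in codes:
--             if code.startswith('DIAB1'):
--                 found_diabetes = True
--                 break
--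
--         if found_diabetes:
--             result.append(patient)
--
--     return result
-- ===== SOURCE B (Python) =====
-- def findPatientsWithDiabetes(patients: list[dict]) -> list[dict]:
--     # One substring search instead of tokenizing: a condition code starts with
--     # 'DIAB1' iff ' DIAB1' occurs in the conditions string prefixed with one space.
--     return [p for p in patients if (' ' + p["conditions"]).find(' DIAB1') != -1]
-- ===== Notes on version B (the rewrite author's own statement) =====
-- stated objective: idiomatic
-- what changed: Replaces split-into-codes plus an inner startswith loop by a single substring search for ' DIAB1' in the space-prefixed conditions string, inside a list comprehension.
import Mathlib
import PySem

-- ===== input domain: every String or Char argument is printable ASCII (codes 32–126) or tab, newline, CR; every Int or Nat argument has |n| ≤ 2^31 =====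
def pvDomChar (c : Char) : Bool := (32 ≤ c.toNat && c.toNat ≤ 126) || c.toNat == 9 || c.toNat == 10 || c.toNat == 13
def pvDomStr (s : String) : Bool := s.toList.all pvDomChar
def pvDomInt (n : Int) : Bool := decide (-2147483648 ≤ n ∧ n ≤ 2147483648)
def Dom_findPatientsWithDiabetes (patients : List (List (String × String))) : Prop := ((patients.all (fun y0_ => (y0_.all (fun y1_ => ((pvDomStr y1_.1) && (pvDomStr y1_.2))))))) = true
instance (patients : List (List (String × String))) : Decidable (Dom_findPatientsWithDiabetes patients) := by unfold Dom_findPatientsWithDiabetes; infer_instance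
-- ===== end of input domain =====

-- B replaces A's split-into-codes + inner startswith loop by a single substring search
-- for " DIAB1" in the space-prefixed conditions string (idiomatic; same cost).

-- ===== PORT A =====
-- code.startswith('DIAB1') tested over the non-empty codes of conditions.split(' ');
-- the flag-and-break loop is List.any.
def pvHasDiabA (conditionsStr : String) : Bool :=
  match PySem.Str.split? conditionsStr " " with
  | none => false  -- unreachable: the separator " " is non-empty
  | some codes => (codes.filter (fun c => c ≠ "")).any (fun code => PySem.Str.startswith code "DIAB1")

def findPatientsWithDiabetes (patients : List (List (String × String))) : List (List (String × String)) :=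
  patients.foldl (fun result patient =>
    -- patient["conditions"]: KeyError (a missing key) is excluded by Pre_
    let conditionsStr := (PySem.Dict.get? (PySem.Dict.mk patient) "conditions").getD ""
    if pvHasDiabA conditionsStr then result ++ [patient] else result) []

-- ===== PORT B =====
def findPatientsWithDiabetes_alt (patients : List (List (String × String))) : List (List (String × String)) :=
  patients.filter (fun patient =>
    PySem.Chars.find (' ' :: ((PySem.Dict.get? (PySem.Dict.mk patient) "conditions").getD "").toList)
      (" DIAB1".toList) != -1)

-- ===== PRECONDITION & SPEC =====
-- Pre_ excludes patients without a "conditions" key, on which A raises KeyError.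
def Pre_findPatientsWithDiabetes (patients : List (List (String × String))) : Prop :=
  ∀ patient ∈ patients, (PySem.Dict.get? (PySem.Dict.mk patient) "conditions").isSome = true
instance (patients : List (List (String × String))) : Decidable (Pre_findPatientsWithDiabetes patients) := by
  unfold Pre_findPatientsWithDiabetes; infer_instance

def pvWitness_findPatientsWithDiabetes : (List (List (String × String))) :=
  [[("conditions", "DIAB100 X"), ("name", "a")], [("conditions", "COLD")]]

def Spec_findPatientsWithDiabetes (patients : List (List (String × String))) (out : List (List (String × String))) : Prop := out = findPatientsWithDiabetes_alt patients
instance (patients : List (List (String × String))) (out : List (List (String × String))) : Decidable (Spec_findPatientsWithDiabetes patients out) := by unfold Spec_findPatientsWithDiabetes; infer_instance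

-- ===== CLAIM (what is proved, stated in full; the proofs are below) =====
def Claim_equal_findPatientsWithDiabetes : Prop := ∀ (patients : List (List (String × String))), Dom_findPatientsWithDiabetes patients → Pre_findPatientsWithDiabetes patients → Spec_findPatientsWithDiabetes patients (findPatientsWithDiabetes patients)

-- ===== LEMMAS AND PROOFS =====

theorem pvSplitOnGo (c : Char) : ∀ (fuel : Nat) (l cur : List Char) (acc : List (List Char)),
    l.length ≤ fuel →
    PySem.Chars.splitOn.go [c] fuel l cur acc
      = acc.reverse ++ (List.splitOnP (· == c) l).modifyHead (cur.reverse ++ ·) := by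
  intro fuel
  induction fuel with
  | zero =>
    intro l cur acc h
    have : l = [] := List.length_eq_zero_iff.mp (Nat.le_zero.mp h)
    subst this
    simp [PySem.Chars.splitOn.go, List.splitOnP_nil]
  | succ f ih =>
    intro l cur acc h
    cases l with
    | nil => simp [PySem.Chars.splitOn.go, List.splitOnP_nil]
    | cons a rest =>
      by_cases hac : a = c
      · subst hac
        have hpre : List.isPrefixOf [a] (a :: rest) = true := by
          simp [List.isPrefixOf]
        rw [PySem.Chars.splitOn.go]
        simp only [hpre, if_true, List.length_cons, List.length_nil, List.drop_succ_cons, List.drop_zero]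
        rw [ih rest [] ((cur.reverse) :: acc) (by simpa using Nat.lt_succ_iff.mp (by simpa using h))]
        simp [List.splitOnP_cons]
        cases List.splitOnP (fun x => x == a) rest <;> simp
      · have hpre : List.isPrefixOf [c] (a :: rest) = false := by
          simp [List.isPrefixOf, Ne.symm hac]
        rw [PySem.Chars.splitOn.go]
        simp only [hpre]
        rw [ih rest (a :: cur) acc (by simpa using Nat.lt_succ_iff.mp (by simpa using h))]
        rw [List.splitOnP_cons]
        simp only [hac, if_false, beq_iff_eq]
        cases hsp : List.splitOnP (· == c) rest with
        | nil => exact absurd hsp (List.splitOnP_ne_nil _ _)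
        | cons hd t => simp

theorem pvSplitOnEq (c : Char) (cs : List Char) :
    PySem.Chars.splitOn cs [c] = List.splitOnP (· == c) cs := by
  unfold PySem.Chars.splitOn
  rw [pvSplitOnGo c (cs.length + 1) cs [] [] (Nat.le_succ _)]
  cases hsp : List.splitOnP (· == c) cs with
  | nil => exact absurd hsp (List.splitOnP_ne_nil _ _)
  | cons hd t => simp

theorem pvPrefixAppendCons {p xs ys : List Char} {b : Char} (hb : b ∉ p) :
    p <+: xs ++ b :: ys ↔ p <+: xs := by
  constructor
  · intro h
    have hlen : p.length ≤ xs.length := by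
      by_contra hlt
      push Not at hlt
      have := h.getElem (i := xs.length) (by omega)
      simp at this
      exact hb (this ▸ List.getElem_mem _)
    have := List.prefix_iff_eq_take.mp h
    rw [List.take_append_of_le_length hlen] at this
    exact this ▸ List.take_prefix _ _
  · intro h
    exact h.trans (List.prefix_append _ _)

theorem pvTok (c : Char) (p : List Char) (hp : p ≠ []) (hc : c ∉ p) :
    ∀ (cs cur : List Char),
    ((((List.splitOnP (· == c) cs).modifyHead (cur ++ ·)).filter (fun t => t ≠ [])).any (fun t => p.isPrefixOf t)) = true
      ↔ (p <+: cur ++ cs ∨ (c :: p) <:+: cs) := by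
  intro cs
  induction cs with
  | nil =>
    intro cur
    simp only [List.splitOnP_nil, List.modifyHead_cons, List.append_nil]
    by_cases hcur : cur = []
    · subst hcur
      simp [hp, List.prefix_nil]
    · simp [hcur, List.isPrefixOf_iff_prefix]
  | cons a rest ih =>
    intro cur
    rw [List.splitOnP_cons]
    by_cases hac : a = c
    · subst hac
      simp only [beq_self_eq_true, if_true, List.modifyHead_cons, List.append_nil]
      -- left side: token cur (if non-empty) or a later token of rest
      have hfilter :
          ((cur :: List.splitOnP (· == a) rest).filter (fun t => t ≠ [])).any (fun t => p.isPrefixOf t)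
            = ((cur ≠ [] : Bool) && p.isPrefixOf cur
              || (((List.splitOnP (· == a) rest).modifyHead (([] : List Char) ++ ·)).filter (fun t => t ≠ [])).any (fun t => p.isPrefixOf t)) := by
        cases hsp : List.splitOnP (· == a) rest with
        | nil => exact absurd hsp (List.splitOnP_ne_nil _ _)
        | cons hd t =>
          by_cases hcur : cur = []
          · subst hcur; simp
          · simp [hcur]
      rw [hfilter]
      have hiff := ih []
      constructor
      · intro h
        rcases Bool.or_eq_true_iff.mp h with h1 | h2
        · left
          have := (Bool.and_eq_true_iff.mp h1).2
          exact (List.isPrefixOf_iff_prefix.mp this).trans (List.prefix_append _ _)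
        · rcases hiff.mp h2 with h3 | h3
          · right
            simp only [List.nil_append] at h3
            exact List.infix_cons_iff.mpr (Or.inl (List.cons_prefix_cons.mpr ⟨rfl, h3⟩))
          · right
            exact List.infix_cons_iff.mpr (Or.inr h3)
      · intro h
        rcases h with h1 | h1
        · -- p <+: cur ++ a :: rest, a ∉ p ⇒ p <+: cur
          have hpc := pvPrefixAppendCons hc |>.mp h1
          have hne : cur ≠ [] := by
            intro hn; subst hn; exact hp (List.prefix_nil.mp hpc)
          exact Bool.or_eq_true_iff.mpr (Or.inl (Bool.and_eq_true_iff.mpr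
            ⟨by simp [hne], List.isPrefixOf_iff_prefix.mpr hpc⟩))
        · rcases List.infix_cons_iff.mp h1 with h2 | h2
          · obtain ⟨-, h3⟩ := List.cons_prefix_cons.mp h2
            exact Bool.or_eq_true_iff.mpr (Or.inr (hiff.mpr (Or.inl (by simpa using h3))))
          · exact Bool.or_eq_true_iff.mpr (Or.inr (hiff.mpr (Or.inr h2)))
    · simp only [beq_iff_eq, hac, if_false]
      have hmod : (List.modifyHead (cur ++ ·) (List.modifyHead (List.cons a) (List.splitOnP (· == c) rest)))
          = List.modifyHead ((cur ++ [a]) ++ ·) (List.splitOnP (· == c) rest) := by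
        rw [List.modifyHead_modifyHead]
        congr 1
        funext x
        simp
      rw [hmod, ih (cur ++ [a])]
      constructor
      · rintro (h1 | h1)
        · left; simpa using h1
        · right; exact List.infix_cons_iff.mpr (Or.inr h1)
      · rintro (h1 | h1)
        · left; simpa using h1
        · rcases List.infix_cons_iff.mp h1 with h2 | h2
          · exact absurd (List.cons_prefix_cons.mp h2).1.symm hac
          · right; exact h2

theorem pvPointwise (s : String) :
    pvHasDiabA s = (PySem.Chars.find (' ' :: s.toList) (" DIAB1".toList) != -1) := by
  rw [Bool.eq_iff_iff]
  unfold pvHasDiabA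
  rw [show PySem.Str.split? s " " = some ((PySem.Chars.splitOn s.toList [' ']).map String.ofList) from by
    simp [PySem.Str.split?, PySem.Chars.split?]]
  rw [pvSplitOnEq]
  have htok := pvTok ' ' ("DIAB1".toList) (by decide) (by decide) s.toList []
  simp only [List.nil_append] at htok
  simp only [List.filter_map, List.any_map, Function.comp_def, PySem.Str.startswith_eq,
    String.toList_ofList, PySem.Chars.startswith, ne_eq, String.ofList_eq_empty_iff]
  have hmid : (List.modifyHead (fun x => x) (List.splitOnP (fun x => x == ' ') s.toList)) = List.splitOnP (fun x => x == ' ') s.toList := by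
    cases hsp : List.splitOnP (fun x => x == ' ') s.toList with
    | nil => exact absurd hsp (List.splitOnP_ne_nil _ _)
    | cons hd t => simp
  rw [hmid] at htok
  rw [htok, bne_iff_ne, PySem.Chars.find_ne_neg_one_iff,
    show (" DIAB1".toList) = ' ' :: "DIAB1".toList from by decide, List.infix_cons_iff,
    List.cons_prefix_cons]
  simp [or_comm]

-- ===== VERDICT (by name: the statement is the Claim_ definition above) =====
theorem findPatientsWithDiabetes_spec : Claim_equal_findPatientsWithDiabetes := by
  intro patients _ _
  unfold Spec_findPatientsWithDiabetes findPatientsWithDiabetes findPatientsWithDiabetes_alt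
  rw [PySem.List.foldl_append_if_eq_filter
    (fun patient => pvHasDiabA ((PySem.Dict.get? (PySem.Dict.mk patient) "conditions").getD ""))]
  simp only [List.nil_append]
  exact List.filter_congr (fun patient _ => pvPointwise _)
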